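-- pv_equiv track=rewrite | github.com/AdamZhouSE/pythonHomework | Code/CodeRecords/2986/58547/289922.py | min_same_sub
-- ===== SOURCE A (Python) =====
-- def min_same_sub(str1, str2):
--     str1 = list(str1)
--     str2 = list(str2)
--     indexes = [-1 for x in range(0, len(str2))]
--
--     j = 0
--     while j < len(str1):
--         i = 0
--         while i < len(str2):
--             if str2[i] == str1[j]:
--                 indexes[i] = j
--             i += 1
--         j += 1
--
--     max_inc_len = 0
--     i = 0
--     now_len = 0
--     now = -1
--     while i < len(indexes):
--         if indexes[i] == -1:
--             i += 1
--             continue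
--         else:
--             if indexes[i] > now:
--                 now = indexes[i]
--                 now_len += 1
--             elif indexes[i] == now:
--                 i += 1
--                 continue
--             else:
--                 # indexes[i] < now
--                 max_inc_len = max(max_inc_len, now_len)
--                 now = indexes[i]
--                 now_len = 1
--     max_inc_len = max(max_inc_len, now_len)
--
--     return max_inc_len
-- ===== SOURCE B (Python) =====
-- def min_same_sub(str1, str2):
--     last = {}
--     for i, c in enumerate(str1):
--         last[c] = i
--     vals = [last[c] for c in str2 if c in last]
--     best = 0
--     for seg in runs(vals):
--         best = max(best, len(set(seg)))
--     return best
--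
--
-- def runs(vals):
--     # partition vals into maximal non-decreasing segments
--     segs = []
--     cur = []
--     for v in vals:
--         if cur and v < cur[-1]:
--             segs.append(cur)
--             cur = [v]
--         else:
--             cur.append(v)
--     if cur:
--         segs.append(cur)
--     return segs
-- ===== Notes on version B (the rewrite author's own statement) =====
-- stated objective: faster
-- what changed: B builds the last-index map in one dict pass over str1, then - instead of A's O(len1*len2) fills and single stateful longest-increasing-run scan with now/now_len/max variables - partitions the matched-index sequence into maximal non-decreasing segments and returns the maximum number of distinct values per segment (a set cardinality).
import Mathlib
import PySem

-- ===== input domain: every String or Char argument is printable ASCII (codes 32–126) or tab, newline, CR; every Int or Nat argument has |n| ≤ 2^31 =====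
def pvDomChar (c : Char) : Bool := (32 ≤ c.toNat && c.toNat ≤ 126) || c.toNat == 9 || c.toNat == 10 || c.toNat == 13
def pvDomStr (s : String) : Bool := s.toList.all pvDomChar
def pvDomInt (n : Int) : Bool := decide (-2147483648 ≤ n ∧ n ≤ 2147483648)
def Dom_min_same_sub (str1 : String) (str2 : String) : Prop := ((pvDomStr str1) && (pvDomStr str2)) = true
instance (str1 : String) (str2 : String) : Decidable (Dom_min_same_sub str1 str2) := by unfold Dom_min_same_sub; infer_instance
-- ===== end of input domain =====

-- B builds the last-index map with one dict pass (O(len1+len2) instead of A's nested loops), then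
-- partitions the matched-index sequence into maximal non-decreasing segments and returns the maximum
-- number of distinct values per segment, instead of A's stateful longest-increasing-run scan.

-- ===== PORT A =====
-- A's second while loop: i, max_inc_len, now_len, now; the 'indexes[i] > now' branch does not advance i,
-- so the loop is transliterated with a fuel argument large enough to cover every iteration (≤ 2*len+1).
def scanA : Nat → List Int → Int → Int → Int → Int → Int × Int
  | 0, _, _, maxl, nowl, _ => (maxl, nowl)
  | fuel+1, idx, i, maxl, nowl, now =>
    if i < PySem.List.len idx then
      let v := PySem.List.pyGetD idx i 0
      if v = -1 then scanA fuel idx (i+1) maxl nowl now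
      else if v > now then scanA fuel idx i maxl (nowl+1) v
      else if v = now then scanA fuel idx (i+1) maxl nowl now
      else scanA fuel idx (i+1) (max maxl nowl) 1 v
    else (maxl, nowl)

def min_same_sub (str1 : String) (str2 : String) : Int :=
  let s1 := str1.toList
  let s2 := str2.toList
  let indexes0 : List Int := (PySem.List.pyRange 0 (PySem.List.len s2) 1).map (fun _ => (-1 : Int))
  let indexes := (PySem.List.pyRange 0 (PySem.List.len s1) 1).foldl
    (fun idx j => (PySem.List.pyRange 0 (PySem.List.len s2) 1).foldl
      (fun idx i =>
        if PySem.List.pyGetD s2 i ' ' = PySem.List.pyGetD s1 j ' ' then PySem.List.pySetD idx i j else idx)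
      idx) indexes0
  let r := scanA (2 * indexes.length + 1) indexes 0 0 0 (-1)
  max r.1 r.2

-- ===== PORT B =====
-- last[c] = i  for i, c in enumerate(str1)
def lastStep (d : PySem.Dict Char Int) (p : Int × Char) : PySem.Dict Char Int := d.insert p.2 p.1
-- body of the segment-partition loop over (segs, cur): close cur and open [v] on a descent
def runsStep (s : List (List Int) × List Int) (v : Int) : List (List Int) × List Int :=
  match s.2.getLast? with
  | some x => if v < x then (s.1 ++ [s.2], [v]) else (s.1, s.2 ++ [v])
  | none => (s.1, s.2 ++ [v])
-- runs(vals): partition into maximal non-decreasing segments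
def runsB (vals : List Int) : List (List Int) :=
  let s := vals.foldl runsStep ([], [])
  if s.2 ≠ [] then s.1 ++ [s.2] else s.1

def min_same_sub_alt (str1 : String) (str2 : String) : Int :=
  let last : PySem.Dict Char Int := (PySem.List.enumerate str1.toList 0).foldl lastStep PySem.Dict.empty
  let vals : List Int := str2.toList.filterMap (fun c => last.get? c)
  (runsB vals).foldl (fun best seg => max best (PySem.Set.len (PySem.Set.ofList seg))) 0

-- ===== PRECONDITION & SPEC =====
def Spec_min_same_sub (str1 : String) (str2 : String) (out : Int) : Prop := out = min_same_sub_alt str1 str2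
instance (str1 : String) (str2 : String) (out : Int) : Decidable (Spec_min_same_sub str1 str2 out) := by unfold Spec_min_same_sub; infer_instance

-- ===== CLAIM (what is proved, stated in full; the proofs are below) =====
def Claim_equal_min_same_sub : Prop := ∀ (str1 : String) (str2 : String), Dom_min_same_sub str1 str2 → Spec_min_same_sub str1 str2 (min_same_sub str1 str2)

-- ===== LEMMAS AND PROOFS =====

-- A's scan loop as a structural recursion over the list (the stay-in-place '>' step fused with
-- the equal-skip step that always follows it).
def scanL : List Int → Int → Int → Int → Int × Int
  | [], maxl, nowl, _ => (maxl, nowl)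
  | v :: r, maxl, nowl, now =>
    if v = -1 then scanL r maxl nowl now
    else if v > now then scanL r maxl (nowl+1) v
    else if v = now then scanL r maxl nowl now
    else scanL r (max maxl nowl) 1 v

-- maximal non-decreasing prefix (relative to prev) and the rest
def splitRun : Int → List Int → List Int × List Int
  | _, [] => ([], [])
  | p, v :: r => if p ≤ v then (v :: (splitRun v r).1, (splitRun v r).2) else ([], v :: r)

theorem splitRun_len (p : Int) (l : List Int) : (splitRun p l).2.length ≤ l.length := by
  induction l generalizing p with
  | nil => simp [splitRun]
  | cons v r ih =>
    simp only [splitRun]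
    by_cases h : p ≤ v
    · rw [if_pos h]; exact le_trans (ih v) (by simp)
    · rw [if_neg h]

-- recursive characterisation of runsB
def runs : List Int → List (List Int)
  | [] => []
  | v :: r => (v :: (splitRun v r).1) :: runs (splitRun v r).2
termination_by l => l.length
decreasing_by
  have := splitRun_len v r
  simp only [List.length_cons]
  omega

-- number of strict ascents while scanning with current value `now`
def asc : Int → List Int → Int
  | _, [] => 0
  | now, v :: r => if now < v then 1 + asc v r else asc now r

-- A's scan without the max register: current-run length semantics
def segScore : List Int → Int → Int → Int
  | [], _, nowl => nowl
  | v :: r, now, nowl =>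
    if now < v then segScore r v (nowl+1)
    else if v = now then segScore r now nowl
    else max nowl (segScore r v 1)

-- best over the segments, recursively
def bestOf : List Int → Int
  | [] => 0
  | v :: r => max (1 + asc v (splitRun v r).1) (bestOf (splitRun v r).2)
termination_by l => l.length
decreasing_by
  have := splitRun_len v r
  simp only [List.length_cons]
  omega

-- the last index recorded for character c by a fold over index/char pairs
def lastF (c : Char) (E : List (Int × Char)) (a : Option Int) : Option Int :=
  E.foldl (fun a p => if p.2 = c then some p.1 else a) a

theorem lastF_shift (c : Char) (E : List (Int × Char)) (a : Option Int) :
    lastF c E a = match lastF c E none with | some v => some v | none => a := by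
  induction E generalizing a with
  | nil => simp [lastF]
  | cons p E ih =>
    simp only [lastF, List.foldl_cons] at *
    by_cases h : p.2 = c
    · rw [if_pos h, if_pos h, ih (some p.1)]
      cases (E.foldl (fun a p => if p.2 = c then some p.1 else a) none) <;> rfl
    · rw [if_neg h, if_neg h, ih a, ih none]

theorem lastF_nonneg (c : Char) (E : List (Int × Char)) (hE : ∀ p ∈ E, 0 ≤ p.1)
    (v : Int) (h : lastF c E none = some v) : 0 ≤ v := by
  induction E generalizing v with
  | nil => simp [lastF] at h
  | cons p E ih =>
    simp only [lastF, List.foldl_cons] at h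
    have h' : lastF c E (if p.2 = c then some p.1 else none) = some v := h
    rw [lastF_shift] at h'
    cases hE2 : lastF c E none with
    | some w =>
      rw [hE2] at h'
      exact ih (fun q hq => hE q (List.mem_cons_of_mem _ hq)) v (by rw [hE2]; simpa using h')
    | none =>
      rw [hE2] at h'
      by_cases hc : p.2 = c
      · simp only [if_pos hc] at h'
        obtain rfl : p.1 = v := by simpa using h'
        exact hE p (List.mem_cons_self ..)
      · simp [if_neg hc] at h'

theorem dict_get?_fold (E : List (Int × Char)) (d0 : PySem.Dict Char Int) (c : Char) :
    (E.foldl lastStep d0).get? c = lastF c E (d0.get? c) := by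
  induction E generalizing d0 with
  | nil => rfl
  | cons p E ih =>
    simp only [List.foldl_cons, lastF, lastStep]
    rw [ih]
    have : (d0.insert p.2 p.1).get? c = if p.2 = c then some p.1 else d0.get? c := by
      rw [PySem.Dict.get?_insert]
      by_cases h : p.2 = c
      · rw [if_pos h, if_pos h.symm]
      · rw [if_neg h, if_neg (fun hc => h hc.symm)]
    rw [this]
    rfl

theorem set_append_cons (pre t : List Int) (v j : Int) :
    (pre ++ v :: t).set pre.length j = pre ++ j :: t := by
  induction pre with
  | nil => rfl
  | cons x pre ih => simp [ih]

theorem zipWith_right (s2 : List Char) :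
    ∀ (mid : List Int), mid.length = s2.length →
    List.zipWith (fun (_ : Char) (o : Int) => o) s2 mid = mid := by
  induction s2 with
  | nil => intro mid h; simp at h; simp [h]
  | cons c t ih =>
    intro mid h
    cases mid with
    | nil => simp at h
    | cons o mid => simpa using ih mid (by simpa using h)

theorem zipWith_zipWith (f g : Char → Int → Int) (s2 : List Char) (mid : List Int) :
    List.zipWith f s2 (List.zipWith g s2 mid) = List.zipWith (fun c o => f c (g c o)) s2 mid := by
  induction s2 generalizing mid with
  | nil => rfl
  | cons c s2 ih => cases mid with
    | nil => rfl
    | cons o mid => simp [List.zipWith, ih]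

theorem zipWith_replicate_map (f : Char → Int → Int) (s2 : List Char) (v : Int) :
    List.zipWith f s2 (List.replicate s2.length v) = s2.map (fun c => f c v) := by
  induction s2 with
  | nil => rfl
  | cons c s2 ih => simp [List.replicate, ih]

theorem inner_fold_eq (cj : Char) (j : Int) (s2 : List Char) :
    ∀ (pre mid : List Int), mid.length = s2.length →
    (PySem.List.enumerate s2 (pre.length : Int)).foldl
      (fun idx q => if q.2 = cj then PySem.List.pySetD idx q.1 j else idx) (pre ++ mid)
    = pre ++ List.zipWith (fun ch old => if ch = cj then j else old) s2 mid := by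
  induction s2 with
  | nil =>
    intro pre mid hlen
    simp at hlen
    subst hlen
    simp [PySem.List.enumerate_nil]
  | cons c t ih =>
    intro pre mid hlen
    cases mid with
    | nil => simp at hlen
    | cons v mid =>
      simp only [PySem.List.enumerate_cons, List.foldl_cons]
      have hset : (if c = cj then PySem.List.pySetD (pre ++ v :: mid) (pre.length : Int) j
          else pre ++ v :: mid) = pre ++ (if c = cj then j else v) :: mid := by
        by_cases h : c = cj
        · rw [if_pos h, if_pos h, PySem.List.pySetD_natCast, set_append_cons]
        · rw [if_neg h, if_neg h]
      have hlen' : mid.length = t.length := by simpa using hlen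
      have := ih (pre ++ [if c = cj then j else v]) mid hlen'
      simp only [List.length_append, List.length_singleton] at this
      rw [hset]
      rw [show ((pre.length : Int) + 1) = ((pre.length + 1 : Nat) : Int) by push_cast; ring]
      rw [show pre ++ (if c = cj then j else v) :: mid = (pre ++ [if c = cj then j else v]) ++ mid by simp]
      rw [this]
      simp [List.zipWith]

theorem full_fill (s2 : List Char) (E : List (Int × Char)) :
    ∀ (mid : List Int), mid.length = s2.length →
    E.foldl (fun idx p => (PySem.List.enumerate s2 (0:Int)).foldl
      (fun idx q => if q.2 = p.2 then PySem.List.pySetD idx q.1 p.1 else idx) idx) mid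
    = List.zipWith (fun ch old => (lastF ch E none).getD old) s2 mid := by
  induction E with
  | nil =>
    intro mid hlen
    simp only [List.foldl_nil, lastF, List.foldl_nil, Option.getD_none]
    exact (zipWith_right s2 mid hlen).symm
  | cons p E ih =>
    intro mid hlen
    simp only [List.foldl_cons]
    have h1 := inner_fold_eq p.2 p.1 s2 [] mid hlen
    simp only [List.length_nil, Nat.cast_zero, List.nil_append] at h1
    rw [h1]
    have hlen2 : (List.zipWith (fun ch old => if ch = p.2 then p.1 else old) s2 mid).length = s2.length := by
      simp [List.length_zipWith, hlen]
    rw [ih _ hlen2, zipWith_zipWith]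
    have hfg : (fun (c : Char) (o : Int) => (lastF c E none).getD (if c = p.2 then p.1 else o))
        = (fun (c : Char) (o : Int) => (lastF c (p :: E) none).getD o) := by
      funext c o
      have hrw : lastF c (p :: E) none = lastF c E (if p.2 = c then some p.1 else none) := rfl
      rw [hrw, lastF_shift c E (if p.2 = c then some p.1 else none)]
      cases hE : lastF c E none with
      | some w => simp
      | none =>
        by_cases hc : c = p.2
        · rw [if_pos hc, if_pos hc.symm]; rfl
        · rw [if_neg hc, if_neg (fun h => hc h.symm)]
    rw [hfg]

theorem scanA_eq_scanL (l : List Int) :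
    ∀ (n k : Nat) (maxl nowl now : Int), 2 * (l.length - k) < n →
    scanA n l (k : Int) maxl nowl now = scanL (l.drop k) maxl nowl now := by
  intro n
  induction n using Nat.strong_induction_on with
  | _ n ihn =>
    intro k maxl nowl now hfuel
    cases n with
    | zero => omega
    | succ m =>
      by_cases hk : k < l.length
      · have hki : (k : Int) < PySem.List.len l := by
          simp only [PySem.List.len_eq]; exact_mod_cast hk
        have hget : PySem.List.pyGetD l (k : Int) 0 = l[k] := by
          rw [PySem.List.pyGetD_natCast, List.getD_eq_getElem l 0 hk]
        rw [List.drop_eq_getElem_cons hk]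
        simp only [scanA, if_pos hki, hget, scanL]
        have hcast : ((k : Int) + 1) = (((k+1 : Nat)) : Int) := by push_cast; ring
        by_cases h1 : l[k] = -1
        · rw [if_pos h1, if_pos h1, hcast]
          exact ihn m (by omega) (k+1) _ _ _ (by omega)
        · rw [if_neg h1, if_neg h1]
          by_cases h2 : l[k] > now
          · rw [if_pos h2, if_pos h2]
            cases m with
            | zero => omega
            | succ m' =>
              simp only [scanA, if_pos hki, hget, if_neg h1, lt_irrefl]
              rw [hcast]
              exact ihn m' (by omega) (k+1) _ _ _ (by omega)
          · rw [if_neg h2, if_neg h2]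
            by_cases h3 : l[k] = now
            · rw [if_pos h3, if_pos h3, hcast]
              exact ihn m (by omega) (k+1) _ _ _ (by omega)
            · rw [if_neg h3, if_neg h3, hcast]
              exact ihn m (by omega) (k+1) _ _ _ (by omega)
      · have hki : ¬ ((k : Int) < PySem.List.len l) := by
          simp only [PySem.List.len_eq]; exact_mod_cast hk
        rw [List.drop_eq_nil_of_le (by omega)]
        simp only [scanA, if_neg hki, scanL]

theorem scanL_map_filterMap (g : Char → Option Int) (hg : ∀ c v, g c = some v → v ≠ -1) :
    ∀ (s2 : List Char) (maxl nowl now : Int),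
    scanL (s2.map (fun c => (g c).getD (-1))) maxl nowl now
    = scanL (s2.filterMap g) maxl nowl now := by
  intro s2
  induction s2 with
  | nil => intro maxl nowl now; rfl
  | cons c t ih =>
    intro maxl nowl now
    cases hgc : g c with
    | none =>
      simp only [List.map_cons, List.filterMap_cons, hgc, Option.getD_none, scanL]
      exact ih maxl nowl now
    | some u =>
      have hu : u ≠ -1 := hg c u hgc
      simp only [List.map_cons, List.filterMap_cons, hgc, Option.getD_some, scanL]
      split_ifs <;> apply ih

-- ===== new B-side lemmas: partition vs. scan =====

theorem asc_nonneg (now : Int) (l : List Int) : 0 ≤ asc now l := by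
  induction l generalizing now with
  | nil => simp [asc]
  | cons v r ih =>
    simp only [asc]
    by_cases h : now < v
    · rw [if_pos h]; have := ih v; omega
    · rw [if_neg h]; exact ih now

theorem scanL_segScore (l : List Int) :
    ∀ (maxl nowl now : Int), (∀ v ∈ l, v ≠ -1) →
    max (scanL l maxl nowl now).1 (scanL l maxl nowl now).2 = max maxl (segScore l now nowl) := by
  induction l with
  | nil => intro maxl nowl now _; rfl
  | cons v r ih =>
    intro maxl nowl now hall
    have hv : v ≠ -1 := hall v (List.mem_cons_self ..)
    have hall' : ∀ w ∈ r, w ≠ -1 := fun w hw => hall w (List.mem_cons_of_mem _ hw)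
    simp only [scanL, segScore, if_neg hv]
    by_cases h1 : v > now
    · rw [if_pos h1, if_pos h1]
      exact ih maxl (nowl+1) v hall'
    · rw [if_neg h1, if_neg h1]
      by_cases h2 : v = now
      · rw [if_pos h2, if_pos h2]
        exact ih maxl nowl now hall'
      · rw [if_neg h2, if_neg h2]
        rw [ih (max maxl nowl) 1 v hall']
        omega

theorem segScore_split (l : List Int) :
    ∀ (now nowl : Int), 0 ≤ nowl →
    segScore l now nowl = max (nowl + asc now (splitRun now l).1) (bestOf (splitRun now l).2) := by
  induction l with
  | nil =>
    intro now nowl h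
    simp only [segScore, splitRun, asc, bestOf]
    omega
  | cons v r ih =>
    intro now nowl h
    simp only [segScore, splitRun]
    by_cases h1 : now < v
    · rw [if_pos h1, if_pos (le_of_lt h1)]
      rw [ih v (nowl+1) (by omega)]
      simp only [asc, if_pos h1]
      omega
    · rw [if_neg h1]
      by_cases h2 : v = now
      · subst h2
        simp only [le_refl, if_true, asc, if_neg h1]
        exact ih v nowl h
      · rw [if_neg h2, if_neg (by omega : ¬ now ≤ v)]
        rw [ih v 1 (by omega)]
        simp only [asc, bestOf]
        omega

theorem splitRun_chain (p : Int) (l : List Int) : List.IsChain (· ≤ ·) (p :: (splitRun p l).1) := by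
  induction l generalizing p with
  | nil => simp [splitRun]
  | cons v r ih =>
    simp only [splitRun]
    by_cases h : p ≤ v
    · rw [if_pos h]
      exact List.IsChain.cons_cons h (ih v)
    · rw [if_neg h]
      simp

theorem chain_le_of_mem (a : Int) (l : List Int) (h : List.IsChain (· ≤ ·) (a :: l)) :
    ∀ x ∈ l, a ≤ x := by
  intro x hx
  have hp : List.Pairwise (· ≤ ·) (a :: l) :=
    (List.isChain_iff_pairwise).mp h
  exact (List.pairwise_cons.mp hp).1 x hx

theorem chain_dedup_len (h : List Int) :
    ∀ (p : Int), List.IsChain (· ≤ ·) (p :: h) → ((p :: h).dedup.length : Int) = 1 + asc p h := by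
  induction h with
  | nil => intro p _; simp [asc]
  | cons w t ih =>
    intro p hc
    obtain ⟨hpw, hct⟩ := List.isChain_cons_cons.mp hc
    by_cases h1 : p < w
    · have hnot : p ∉ w :: t := by
        intro hmem
        rcases List.mem_cons.mp hmem with h | h
        · omega
        · have := chain_le_of_mem w t hct p h; omega
      rw [List.dedup_cons_of_notMem hnot]
      simp only [List.length_cons, asc, if_pos h1]
      have := ih w hct
      push_cast at this ⊢
      omega
    · have hpw' : p = w := by omega
      subst hpw'
      have hmem : p ∈ p :: t := List.mem_cons_self ..
      rw [List.dedup_cons_of_mem hmem]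
      simp only [asc, if_neg h1]
      exact ih p hct

theorem setLen_ofList (l : List Int) : PySem.Set.len (PySem.Set.ofList l) = (l.dedup.length : Int) := by
  have hperm : (PySem.Set.ofList l).Perm l.dedup := by
    rw [List.perm_ext_iff_of_nodup (PySem.Set.nodup_ofList l) (List.nodup_dedup l)]
    intro a
    rw [PySem.Set.mem_ofList, List.mem_dedup]
  simp [PySem.Set.len, hperm.length_eq]

theorem seg_score_eq (v : Int) (r : List Int) :
    PySem.Set.len (PySem.Set.ofList (v :: (splitRun v r).1)) = 1 + asc v (splitRun v r).1 := by
  rw [setLen_ofList]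
  exact chain_dedup_len (splitRun v r).1 v (splitRun_chain v r)

theorem foldl_runs (l : List Int) :
    ∀ (b : Int), 0 ≤ b →
    (runs l).foldl (fun best seg => max best (PySem.Set.len (PySem.Set.ofList seg))) b
      = max b (bestOf l) := by
  induction l using runs.induct with
  | case1 => intro b hb; simp only [runs, bestOf, List.foldl_nil]; omega
  | case2 v r ih =>
    intro b hb
    simp only [runs, bestOf, List.foldl_cons]
    rw [seg_score_eq]
    have ha := asc_nonneg v (splitRun v r).1
    rw [ih (max b (1 + asc v (splitRun v r).1)) (by omega)]
    omega

theorem foldl_runsStep (l : List Int) :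
    ∀ (segs : List (List Int)) (cur : List Int) (p : Int), cur.getLast? = some p →
    (let s := l.foldl runsStep (segs, cur); if s.2 ≠ [] then s.1 ++ [s.2] else s.1)
      = segs ++ (cur ++ (splitRun p l).1) :: runs (splitRun p l).2 := by
  induction l with
  | nil =>
    intro segs cur p hlast
    have hne : cur ≠ [] := by rintro rfl; simp at hlast
    simp [splitRun, runs, hne]
  | cons v r ih =>
    intro segs cur p hlast
    simp only [List.foldl_cons, runsStep, hlast]
    by_cases h1 : v < p
    · rw [if_pos h1]
      rw [ih (segs ++ [cur]) [v] v rfl]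
      simp only [splitRun, if_neg (by omega : ¬ p ≤ v), runs]
      simp
    · rw [if_neg h1]
      rw [ih segs (cur ++ [v]) v (by simp)]
      simp only [splitRun, if_pos (by omega : p ≤ v)]
      simp

theorem runsB_eq_runs (vals : List Int) : runsB vals = runs vals := by
  cases vals with
  | nil => simp [runsB, runs]
  | cons v r =>
    show (let s := (v :: r).foldl runsStep ([], []); if s.2 ≠ [] then s.1 ++ [s.2] else s.1) = _
    simp only [List.foldl_cons]
    rw [show runsStep ([], []) v = (([] : List (List Int)), [v]) from rfl]
    rw [foldl_runsStep r [] [v] v rfl]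
    simp [runs]

theorem scan_partition (l : List Int) (hnn : ∀ v ∈ l, 0 ≤ v) :
    max (scanL l 0 0 (-1)).1 (scanL l 0 0 (-1)).2
      = (runsB l).foldl (fun best seg => max best (PySem.Set.len (PySem.Set.ofList seg))) 0 := by
  have hne : ∀ v ∈ l, v ≠ (-1 : Int) := by
    intro v hv
    have := hnn v hv
    omega
  rw [scanL_segScore l 0 0 (-1) hne, runsB_eq_runs, foldl_runs l 0 le_rfl]
  cases l with
  | nil => simp [segScore, bestOf]
  | cons v r =>
    have hv : (0:Int) ≤ v := hnn v (List.mem_cons_self ..)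
    simp only [segScore, if_pos (by omega : (-1:Int) < v), bestOf, zero_add]
    rw [segScore_split r v 1 (by omega)]

-- ===== VERDICT (by name: the statement is the Claim_ definition above) =====
theorem min_same_sub_spec : Claim_equal_min_same_sub := by
  intro str1 str2 _
  show min_same_sub str1 str2 = min_same_sub_alt str1 str2
  unfold min_same_sub min_same_sub_alt
  simp only []
  rw [show ((PySem.List.pyRange 0 (PySem.List.len str2.toList) 1).map (fun _ => (-1 : Int)))
      = List.replicate str2.toList.length (-1) by
    rw [List.eq_replicate_iff]
    constructor
    · simp [PySem.List.length_pyRange_one]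
    · simp]
  have h2 : ∀ (cj : Char) (j : Int) (idx : List Int),
      (PySem.List.pyRange 0 (PySem.List.len str2.toList) 1).foldl
        (fun idx i => if PySem.List.pyGetD str2.toList i ' ' = cj
          then PySem.List.pySetD idx i j else idx) idx
      = (PySem.List.enumerate str2.toList 0).foldl
        (fun idx q => if q.2 = cj then PySem.List.pySetD idx q.1 j else idx) idx := by
    intro cj j idx
    rw [show PySem.List.enumerate str2.toList 0
        = (PySem.List.pyRange 0 (PySem.List.len str2.toList) 1).map
            (fun j => (j, PySem.List.pyGetD str2.toList j ' '))
      from PySem.List.enumerate_eq_map_pyRange str2.toList ' ', List.foldl_map]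
  have hfill : (PySem.List.pyRange 0 (PySem.List.len str1.toList) 1).foldl
      (fun idx j => (PySem.List.pyRange 0 (PySem.List.len str2.toList) 1).foldl
        (fun idx i => if PySem.List.pyGetD str2.toList i ' ' = PySem.List.pyGetD str1.toList j ' '
          then PySem.List.pySetD idx i j else idx) idx)
      (List.replicate str2.toList.length (-1))
      = str2.toList.map
          (fun c => (lastF c (PySem.List.enumerate str1.toList 0) none).getD (-1)) := by
    have h1 : (PySem.List.pyRange 0 (PySem.List.len str1.toList) 1).foldl
        (fun idx j => (PySem.List.pyRange 0 (PySem.List.len str2.toList) 1).foldl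
          (fun idx i => if PySem.List.pyGetD str2.toList i ' ' = PySem.List.pyGetD str1.toList j ' '
            then PySem.List.pySetD idx i j else idx) idx)
        (List.replicate str2.toList.length (-1))
        = (PySem.List.enumerate str1.toList 0).foldl
          (fun idx p => (PySem.List.enumerate str2.toList 0).foldl
            (fun idx q => if q.2 = p.2 then PySem.List.pySetD idx q.1 p.1 else idx) idx)
          (List.replicate str2.toList.length (-1)) := by
      rw [show PySem.List.enumerate str1.toList 0
          = (PySem.List.pyRange 0 (PySem.List.len str1.toList) 1).map
              (fun j => (j, PySem.List.pyGetD str1.toList j ' '))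
        from PySem.List.enumerate_eq_map_pyRange str1.toList ' ', List.foldl_map]
      congr 1
      funext idx j
      exact h2 (PySem.List.pyGetD str1.toList j ' ') j idx
    rw [h1, full_fill str2.toList (PySem.List.enumerate str1.toList 0) _ (by simp),
      zipWith_replicate_map]
  rw [hfill]
  have hEnn : ∀ p ∈ PySem.List.enumerate str1.toList 0, 0 ≤ p.1 := by
    intro p hp
    rw [PySem.List.mem_enumerate_iff] at hp
    obtain ⟨k, hk, rfl⟩ := hp
    simp
  have hg : ∀ (c : Char) (v : Int),
      lastF c (PySem.List.enumerate str1.toList 0) none = some v → v ≠ -1 := by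
    intro c v h
    have := lastF_nonneg c _ hEnn v h
    omega
  have hscan := scanA_eq_scanL
    (str2.toList.map (fun c => (lastF c (PySem.List.enumerate str1.toList 0) none).getD (-1)))
    (2 * (str2.toList.map
      (fun c => (lastF c (PySem.List.enumerate str1.toList 0) none).getD (-1))).length + 1)
    0 0 0 (-1) (by omega)
  simp only [Nat.cast_zero, List.drop_zero] at hscan
  rw [hscan]
  have hmf := scanL_map_filterMap
    (fun c => lastF c (PySem.List.enumerate str1.toList 0) none) hg str2.toList 0 0 (-1)
  simp only [] at hmf
  rw [hmf]
  have hdict : (fun c => ((PySem.List.enumerate str1.toList 0).foldl lastStep PySem.Dict.empty).get? c)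
      = fun c => lastF c (PySem.List.enumerate str1.toList 0) none := by
    funext c
    rw [dict_get?_fold]
    rw [show (PySem.Dict.empty : PySem.Dict Char Int).get? c = none from rfl]
  rw [hdict]
  apply scan_partition
  intro v hv
  rw [List.mem_filterMap] at hv
  obtain ⟨c0, _, hc0⟩ := hv
  exact lastF_nonneg c0 _ hEnn v hc0
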